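-- pv_equiv track=rewrite | github.com/blackrama/portaOne_example | porta.py | LongestDecreasingSublist
-- ===== SOURCE A (Python) =====
-- def LongestDecreasingSublist(a):
--     lds, current = [], [a[0]]
--     for val in a[1:]:
--         if val < current[-1]:
--             current.append(val)
--         else:
--             lds = current[:] if len(current) > len(lds) else lds
--             current = [val]
--     lds = current[:] if len(current) > len(lds) else lds
--     return lds
-- ===== SOURCE B (Python) =====
-- def LongestDecreasingSublist(a):
--     n = len(a)
--     L = [1] * n
--     for i in range(n - 2, -1, -1):
--         if a[i] > a[i + 1]:
--             L[i] = L[i + 1] + 1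
--     best = 0
--     for i in range(1, n):
--         if L[i] > L[best]:
--             best = i
--     return a[best:best + L[best]]
-- ===== Notes on version B (the rewrite author's own statement) =====
-- stated objective: alternative
-- what changed: Replaces A's single forward scan that maintains the current run and the best-so-far copy with a two-phase algorithm: a backward DP computing for each index the length of the strictly-decreasing run starting there, then an argmax scan over that array and a single slice of the input.
import Mathlib
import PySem

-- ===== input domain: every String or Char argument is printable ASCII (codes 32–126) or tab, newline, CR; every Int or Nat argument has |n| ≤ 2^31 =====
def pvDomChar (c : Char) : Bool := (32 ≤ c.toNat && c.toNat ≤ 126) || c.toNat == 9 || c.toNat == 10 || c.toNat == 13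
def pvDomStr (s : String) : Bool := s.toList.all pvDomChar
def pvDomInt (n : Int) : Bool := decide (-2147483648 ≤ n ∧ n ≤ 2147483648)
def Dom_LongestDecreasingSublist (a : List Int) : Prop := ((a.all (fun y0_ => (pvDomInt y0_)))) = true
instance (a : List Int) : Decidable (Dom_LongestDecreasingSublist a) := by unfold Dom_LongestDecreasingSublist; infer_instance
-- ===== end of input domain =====

-- B replaces A's single forward run-tracking scan by a backward run-length DP plus an
-- argmax scan and one slice (objective: alternative, same O(n) cost).
-- Both programs raise IndexError on the empty list; Pre_ excludes it.

-- ===== PORT A =====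
-- loop body of A: state (lds, current), 'val < current[-1]' via pyGetD at -1
def LDSstep (s : List Int × List Int) (val : Int) : List Int × List Int :=
  if val < PySem.List.pyGetD s.2 (-1) 0 then (s.1, s.2 ++ [val])
  else (if s.2.length > s.1.length then s.2 else s.1, [val])

def LongestDecreasingSublist (a : List Int) : List Int :=
  match a with
  | [] => []   -- Python's initial subscript of the first element raises IndexError here; excluded by Pre_
  | x :: rest =>
    let s := rest.foldl LDSstep ([], [x])
    if s.2.length > s.1.length then s.2 else s.1

-- ===== PORT B =====
-- Source B's backward loop 'for i in range(n-2,-1,-1): L[i] = L[i+1]+1 if a[i] > a[i+1] else 1'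
-- expressed as right-to-left recursion computing the same list L.
def buildL : List Int → List Int
  | [] => []
  | [_] => [1]
  | x :: y :: rest =>
    let L := buildL (y :: rest)
    (if y < x then L.headD 0 + 1 else 1) :: L

-- loop body of Source B's argmax scan: 'if L[i] > L[best]: best = i'
def bestStep (L : List Int) (b i : Int) : Int :=
  if PySem.List.pyGetD L b 0 < PySem.List.pyGetD L i 0 then i else b

def LongestDecreasingSublist_alt (a : List Int) : List Int :=
  let L := buildL a
  let best := (PySem.List.pyRange 1 (a.length : Int) 1).foldl (bestStep L) 0
  PySem.List.slice a (some best) (some (best + PySem.List.pyGetD L best 0))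

-- ===== PRECONDITION & SPEC =====
-- A subscripts the first element immediately, so it raises IndexError exactly on the
-- empty list (and B's final subscript L[best] raises there too): Pre_ excludes only
-- the empty list.
def Pre_LongestDecreasingSublist (a : List Int) : Prop := a ≠ []
instance (a : List Int) : Decidable (Pre_LongestDecreasingSublist a) := by
  unfold Pre_LongestDecreasingSublist; infer_instance

def pvWitness_LongestDecreasingSublist : List Int := [3, 1, 2]

def Spec_LongestDecreasingSublist (a : List Int) (out : List Int) : Prop := out = LongestDecreasingSublist_alt a
instance (a : List Int) (out : List Int) : Decidable (Spec_LongestDecreasingSublist a out) := by unfold Spec_LongestDecreasingSublist; infer_instance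

-- ===== CLAIM (what is proved, stated in full; the proofs are below) =====
def Claim_equal_LongestDecreasingSublist : Prop := ∀ (a : List Int), Dom_LongestDecreasingSublist a → Pre_LongestDecreasingSublist a → Spec_LongestDecreasingSublist a (LongestDecreasingSublist a)

-- ===== LEMMAS AND PROOFS =====

-- common spec: split a into maximal strictly-decreasing runs, take the first longest one

-- 'current[-1]' shorthand used by the run-splitting spec
def lastD (c : List Int) : Int := PySem.List.pyGetD c (-1) 0

def pick (lds r : List Int) : List Int := if r.length > lds.length then r else lds

def runsStep (x : Int) (rs : List (List Int)) : List (List Int) :=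
  match rs with
  | [] => [[x]]
  | r :: rs' => if r.headD 0 < x then (x :: r) :: rs' else [x] :: r :: rs'

def runs : List Int → List (List Int)
  | [] => []
  | x :: xs => runsStep x (runs xs)

def firstLongest (rs : List (List Int)) : List Int := rs.foldl pick []

def runsAux : List Int → List Int → List (List Int)
  | c, [] => [c]
  | c, v :: vs => if v < lastD c then runsAux (c ++ [v]) vs else c :: runsAux [v] vs

def mergeHead (c : List Int) (rs : List (List Int)) : List (List Int) :=
  match rs with
  | [] => [c]
  | r :: rs' => if r.headD 0 < lastD c then (c ++ r) :: rs' else c :: r :: rs'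

def countdown : Nat → List Int
  | 0 => []
  | n + 1 => ((n + 1 : Nat) : Int) :: countdown n

def lens (rs : List (List Int)) : List Int := rs.flatMap (fun r => countdown r.length)

theorem lastD_singleton (x : Int) : lastD [x] = x :=
  PySem.List.pyGetD_neg_one_append_singleton (xs := []) (x := x) (d := 0)

theorem lastD_append (c : List Int) (v : Int) : lastD (c ++ [v]) = v :=
  PySem.List.pyGetD_neg_one_append_singleton (xs := c) (x := v) (d := 0)

-- ------- A-side -------

theorem foldA : ∀ (rest : List Int) (lds c : List Int),
    pick (rest.foldl LDSstep (lds, c)).1 (rest.foldl LDSstep (lds, c)).2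
      = (runsAux c rest).foldl pick lds := by
  intro rest
  induction rest with
  | nil => intro lds c; simp [runsAux, pick]
  | cons v vs IH =>
    intro lds c
    simp only [List.foldl_cons, runsAux, LDSstep, lastD]
    by_cases h : v < PySem.List.pyGetD c (-1) 0
    · simp only [h, if_pos]
      exact IH lds (c ++ [v])
    · simp only [h, if_neg, not_false_iff, List.foldl_cons]
      have hp : (if c.length > lds.length then c else lds) = pick lds c := rfl
      rw [hp]
      exact IH (pick lds c) [v]

theorem runsAux_eq : ∀ (rest c : List Int), runsAux c rest = mergeHead c (runs rest) := by
  intro rest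
  induction rest with
  | nil => intro c; rfl
  | cons v vs IH =>
    intro c
    by_cases hv : v < lastD c
    · rw [runsAux, if_pos hv, IH (c ++ [v])]
      cases hr : runs vs with
      | nil =>
        simp [runs, runsStep, hr, mergeHead, hv]
      | cons r rs =>
        simp only [runs, runsStep, hr, mergeHead, lastD_append]
        by_cases h2 : r.headD 0 < v
        · rw [if_pos h2, if_pos h2]
          simp only [List.headD_cons, if_pos hv]
          simp
        · rw [if_neg h2, if_neg h2]
          simp only [List.headD_cons, if_pos hv]
    · rw [runsAux, if_neg hv, IH [v]]
      cases hr : runs vs with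
      | nil =>
        simp [runs, runsStep, hr, mergeHead, hv]
      | cons r rs =>
        simp only [runs, runsStep, hr, mergeHead, lastD_singleton]
        by_cases h2 : r.headD 0 < v
        · rw [if_pos h2, if_pos h2]
          simp only [List.headD_cons, if_neg hv]
          simp
        · rw [if_neg h2, if_neg h2]
          simp only [List.headD_cons, if_neg hv]

theorem runs_cons (x : Int) (xs : List Int) : runs (x :: xs) = mergeHead [x] (runs xs) := by
  cases hr : runs xs with
  | nil => simp [runs, runsStep, hr, mergeHead]
  | cons r rs => simp [runs, runsStep, hr, mergeHead, lastD_singleton]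

theorem A_eq (a : List Int) (h : a ≠ []) :
    LongestDecreasingSublist a = firstLongest (runs a) := by
  cases a with
  | nil => exact absurd rfl h
  | cons x rest =>
    show pick (rest.foldl LDSstep ([], [x])).1 (rest.foldl LDSstep ([], [x])).2
        = firstLongest (runs (x :: rest))
    rw [foldA, runsAux_eq, ← runs_cons]
    rfl

-- ------- B-side -------

theorem runs_shape : ∀ (xs : List Int) (x : Int), ∃ t rs, runs (x :: xs) = (x :: t) :: rs := by
  intro xs
  induction xs with
  | nil => intro x; exact ⟨[], [], rfl⟩
  | cons y ys IH =>
    intro x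
    obtain ⟨t, rs, ht⟩ := IH y
    rw [show runs (x :: y :: ys) = runsStep x (runs (y :: ys)) from rfl, ht]
    simp only [runsStep, List.headD_cons]
    by_cases h : y < x
    · rw [if_pos h]; exact ⟨y :: t, rs, rfl⟩
    · rw [if_neg h]; exact ⟨[], (y :: t) :: rs, rfl⟩

theorem mergeHead_flatten (c : List Int) (rs : List (List Int)) :
    (mergeHead c rs).flatten = c ++ rs.flatten := by
  cases rs with
  | nil => simp [mergeHead]
  | cons r rs =>
    simp only [mergeHead]
    by_cases h : r.headD 0 < lastD c
    · rw [if_pos h]; simp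
    · rw [if_neg h]; simp

theorem runs_flatten : ∀ (a : List Int), (runs a).flatten = a := by
  intro a
  induction a with
  | nil => rfl
  | cons x xs IH => rw [runs_cons, mergeHead_flatten, IH]; rfl

theorem runs_ne_nil (a : List Int) (h : a ≠ []) : runs a ≠ [] := by
  cases a with
  | nil => exact absurd rfl h
  | cons x xs =>
    obtain ⟨t, rs, ht⟩ := runs_shape xs x
    rw [ht]; simp

theorem mergeHead_ne (c : List Int) (rs : List (List Int)) (hc : c ≠ [])
    (h : ∀ r ∈ rs, r ≠ []) : ∀ r ∈ mergeHead c rs, r ≠ [] := by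
  cases rs with
  | nil => intro r hr; simp only [mergeHead] at hr; simp at hr; rw [hr]; exact hc
  | cons r0 rs =>
    intro r hr
    simp only [mergeHead] at hr
    by_cases hd : r0.headD 0 < lastD c
    · rw [if_pos hd] at hr
      rcases List.mem_cons.mp hr with h1 | h2
      · rw [h1]; simp [hc]
      · exact h r (List.mem_cons_of_mem _ h2)
    · rw [if_neg hd] at hr
      rcases List.mem_cons.mp hr with h1 | h2
      · rw [h1]; exact hc
      · exact h r h2

theorem runs_forall_ne : ∀ (a : List Int), ∀ r ∈ runs a, r ≠ [] := by
  intro a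
  induction a with
  | nil => intro r hr; simp [runs] at hr
  | cons x xs IH =>
    rw [runs_cons]
    exact mergeHead_ne [x] (runs xs) (by simp) IH

theorem buildL_eq : ∀ (a : List Int), buildL a = lens (runs a) := by
  intro a
  induction a with
  | nil => rfl
  | cons x xs IH =>
    cases xs with
    | nil => simp [buildL, runs, runsStep, lens, countdown]
    | cons y rest =>
      obtain ⟨t, rs, ht⟩ := runs_shape rest y
      rw [buildL, IH, ht,
        show runs (x :: y :: rest) = runsStep x (runs (y :: rest)) from rfl, ht]
      simp only [runsStep, List.headD_cons]
      have hlens1 : lens ((y :: t) :: rs) = countdown (t.length + 1) ++ lens rs := by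
        simp [lens]
      by_cases h : y < x
      · rw [if_pos h, if_pos h]
        have hcd2 : countdown (t.length + 1 + 1)
            = ((t.length + 2 : Nat) : Int) :: countdown (t.length + 1) := by
          rw [countdown]
        have : lens ((x :: y :: t) :: rs)
            = ((t.length + 2 : Nat) : Int) :: (countdown (t.length + 1) ++ lens rs) := by
          simp only [lens, List.flatMap_cons, List.length_cons]
          rw [hcd2]
          rfl
        have hhd : (lens ((y :: t) :: rs)).headD 0 = ((t.length + 1 : Nat) : Int) := by
          rw [hlens1, countdown]; rfl
        rw [this, hhd, hlens1]
        congr 1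
      · rw [if_neg h, if_neg h]
        have : lens ([x] :: (y :: t) :: rs)
            = (1 : Int) :: lens ((y :: t) :: rs) := by
          simp only [lens, List.flatMap_cons, List.length_cons, List.length_nil]
          rw [show countdown 1 = [(1 : Int)] from rfl]
          rfl
        rw [this, hlens1]

theorem buildL_len : ∀ (a : List Int), (buildL a).length = a.length := by
  intro a
  induction a with
  | nil => rfl
  | cons x xs IH =>
    cases xs with
    | nil => rfl
    | cons y rest =>
      rw [buildL]
      simp [IH]

theorem countdown_len (n : Nat) : (countdown n).length = n := by
  induction n with
  | zero => rfl
  | succ m IH => rw [countdown]; simp [IH]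

theorem countdown_getD : ∀ (n i : Nat), i < n → (countdown n).getD i 0 = ((n - i : Nat) : Int) := by
  intro n
  induction n with
  | zero => intro i h; omega
  | succ m IH =>
    intro i h
    cases i with
    | zero => rw [countdown]; rfl
    | succ k =>
      rw [countdown]
      simp only [List.getD_cons_succ]
      rw [IH k (by omega)]
      congr 1
      omega

theorem foldl_pick_eq : ∀ (rs : List (List Int)) (c : List Int), (∀ r ∈ rs, r ≠ []) →
    rs.foldl pick c = if (rs.foldl pick []).length > c.length then rs.foldl pick [] else c := by
  intro rs
  induction rs with
  | nil => intro c _; simp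
  | cons r rs IH =>
    intro c h
    have hr : r ≠ [] := h r (List.mem_cons_self)
    have hrlen : 0 < r.length := List.length_pos_iff.mpr hr
    have hrest : ∀ r' ∈ rs, r' ≠ [] := fun r' hr' => h r' (List.mem_cons_of_mem _ hr')
    have hpr : pick [] r = r := by simp [pick, hrlen]
    rw [List.foldl_cons, List.foldl_cons, hpr, IH r hrest]
    by_cases h1 : r.length > c.length
    · have hp : pick c r = r := by simp [pick, h1]
      rw [hp, IH r hrest]
      by_cases h2 : (rs.foldl pick []).length > r.length
      · rw [if_pos h2, if_pos (show (rs.foldl pick []).length > c.length by omega)]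
      · rw [if_neg h2, if_pos h1]
    · have hp : pick c r = c := by simp [pick, h1]
      rw [hp, IH c hrest]
      by_cases h2 : (rs.foldl pick []).length > r.length
      · rw [if_pos h2]
      · rw [if_neg h2,
          if_neg (show ¬ (rs.foldl pick []).length > c.length by omega),
          if_neg (show ¬ r.length > c.length from h1)]

theorem firstLongest_cons (r : List Int) (rs : List (List Int)) (hr : r ≠ [])
    (h : ∀ r' ∈ rs, r' ≠ []) :
    firstLongest (r :: rs) =
      if (firstLongest rs).length > r.length then firstLongest rs else r := by
  have hrlen : 0 < r.length := List.length_pos_iff.mpr hr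
  show (r :: rs).foldl pick [] = _
  simp only [List.foldl_cons]
  have hp : pick [] r = r := by simp [pick, hrlen]
  rw [hp, foldl_pick_eq rs r h]
  rfl

theorem runs_best : ∀ (rs : List (List Int)), rs ≠ [] → (∀ r ∈ rs, r ≠ []) →
    ∃ j : Nat, j < (lens rs).length ∧
      (lens rs).getD j 0 = ((firstLongest rs).length : Int) ∧
      (∀ i, i < (lens rs).length → (lens rs).getD i 0 ≤ (lens rs).getD j 0) ∧
      (∀ i, i < j → (lens rs).getD i 0 < (lens rs).getD j 0) ∧
      ((rs.flatten.drop j).take (firstLongest rs).length = firstLongest rs) := by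
  intro rs
  induction rs with
  | nil => intro h; exact absurd rfl h
  | cons r rs IH =>
    intro _ hne
    have hr : r ≠ [] := hne r (List.mem_cons_self)
    have hrlen : 0 < r.length := List.length_pos_iff.mpr hr
    have hrest : ∀ r' ∈ rs, r' ≠ [] := fun r' h' => hne r' (List.mem_cons_of_mem _ h')
    have hlens : lens (r :: rs) = countdown r.length ++ lens rs := by simp [lens]
    have hflat : (r :: rs).flatten = r ++ rs.flatten := rfl
    have hfl := firstLongest_cons r rs hr hrest
    have hleft : ∀ i, i < r.length →
        (lens (r :: rs)).getD i 0 = ((r.length - i : Nat) : Int) := by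
      intro i hi
      rw [hlens, List.getD_append _ _ _ _ (by rw [countdown_len]; exact hi)]
      exact countdown_getD r.length i hi
    have hright : ∀ i, r.length ≤ i →
        (lens (r :: rs)).getD i 0 = (lens rs).getD (i - r.length) 0 := by
      intro i hi
      rw [hlens, List.getD_append_right _ _ _ _ (by rw [countdown_len]; exact hi), countdown_len]
    have hlen : (lens (r :: rs)).length = r.length + (lens rs).length := by
      rw [hlens]; simp [countdown_len]
    by_cases hrsnil : rs = []
    · subst hrsnil
      have hfl1 : firstLongest [r] = r := by
        show pick [] r = r
        simp [pick, hrlen]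
      refine ⟨0, ?_, ?_, ?_, ?_, ?_⟩
      · rw [hlen]; simpa [lens] using hrlen
      · rw [hleft 0 hrlen, hfl1]; simp
      · intro i hi
        rw [hlen] at hi
        simp only [lens, List.flatMap_nil, List.length_nil, Nat.add_zero] at hi
        rw [hleft 0 hrlen, hleft i hi]
        simp only [Nat.sub_zero]
        exact_mod_cast Nat.sub_le r.length i
      · intro i hi; omega
      · rw [hfl1, hflat]
        simp
    · obtain ⟨j', hj'len, hj'val, hj'max, hj'strict, hj'slice⟩ := IH hrsnil hrest
      by_cases hcase : (firstLongest rs).length > r.length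
      · -- best is inside rs
        refine ⟨r.length + j', ?_, ?_, ?_, ?_, ?_⟩
        · rw [hlen]; omega
        · rw [hright _ (by omega)]
          simp only [Nat.add_sub_cancel_left]
          rw [hj'val, hfl, if_pos hcase]
        · intro i hi
          rw [hright (r.length + j') (by omega)]
          simp only [Nat.add_sub_cancel_left]
          by_cases hil : i < r.length
          · rw [hleft i hil, hj'val]
            have h2 : (r.length - i : Nat) ≤ (firstLongest rs).length := by omega
            exact_mod_cast h2
          · rw [hright i (by omega)]
            exact hj'max (i - r.length) (by rw [hlen] at hi; omega)
        · intro i hi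
          rw [hright (r.length + j') (by omega)]
          simp only [Nat.add_sub_cancel_left]
          by_cases hil : i < r.length
          · rw [hleft i hil, hj'val]
            have h2 : (r.length - i : Nat) < (firstLongest rs).length := by omega
            exact_mod_cast h2
          · rw [hright i (by omega)]
            exact hj'strict (i - r.length) (by omega)
        · rw [hfl, if_pos hcase, hflat, List.drop_length_add_append]
          exact hj'slice
      · -- best is r itself: j = 0
        refine ⟨0, ?_, ?_, ?_, ?_, ?_⟩
        · rw [hlen]; omega
        · rw [hleft 0 hrlen, hfl, if_neg hcase]; simp
        · intro i hi
          rw [hleft 0 hrlen]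
          simp only [Nat.sub_zero]
          by_cases hil : i < r.length
          · rw [hleft i hil]
            exact_mod_cast Nat.sub_le r.length i
          · rw [hright i (by omega)]
            have h1 := hj'max (i - r.length) (by rw [hlen] at hi; omega)
            rw [hj'val] at h1
            have h2 : ((firstLongest rs).length : Int) ≤ (r.length : Int) := by
              exact_mod_cast Nat.le_of_not_lt hcase
            exact le_trans h1 h2
        · intro i hi; omega
        · rw [hfl, if_neg hcase, hflat]
          simp only [List.drop_zero]
          rw [List.take_left' rfl]

theorem best_fold_aux (L : List Int) :
    ∀ k : Nat, 1 ≤ k → k ≤ L.length →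
    ∃ j : Nat, j < k ∧ (∀ i, i < k → L.getD i 0 ≤ L.getD j 0) ∧
      (∀ i, i < j → L.getD i 0 < L.getD j 0) ∧
      (PySem.List.pyRange 1 (k : Int) 1).foldl (bestStep L) 0 = (j : Int) := by
  intro k
  induction k with
  | zero => intro h; omega
  | succ m IH =>
    intro _ hk
    by_cases hm : 1 ≤ m
    · obtain ⟨j, hj, hmax, hstrict, hfold⟩ := IH hm (by omega)
      have hsplit : PySem.List.pyRange 1 ((m + 1 : Nat) : Int) 1
          = PySem.List.pyRange 1 (m : Int) 1 ++ [(m : Int)] := by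
        push_cast
        exact PySem.List.pyRange_one_succ_right (by exact_mod_cast hm)
      rw [hsplit, List.foldl_append]
      simp only [List.foldl_cons, List.foldl_nil, hfold]
      rw [bestStep]
      simp only [PySem.List.pyGetD_natCast]
      by_cases hc : L.getD j 0 < L.getD m 0
      · rw [if_pos hc]
        refine ⟨m, by omega, ?_, ?_, rfl⟩
        · intro i hi
          by_cases him : i < m
          · exact le_of_lt (lt_of_le_of_lt (hmax i him) hc)
          · have hieq : i = m := by omega
            rw [hieq]
        · intro i hi
          exact lt_of_le_of_lt (hmax i hi) hc
      · rw [if_neg hc]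
        refine ⟨j, by omega, ?_, hstrict, rfl⟩
        intro i hi
        by_cases him : i < m
        · exact hmax i him
        · have hieq : i = m := by omega
          rw [hieq]
          exact le_of_not_gt hc
    · have hm0 : m = 0 := by omega
      subst hm0
      refine ⟨0, by omega, ?_, by omega, ?_⟩
      · intro i hi
        have hieq : i = 0 := by omega
        rw [hieq]
      · rw [show ((0 + 1 : Nat) : Int) = 1 by norm_num,
          PySem.List.pyRange_one_eq_nil (by norm_num)]
        rfl

theorem best_fold (L : List Int) (j : Nat) (hj : j < L.length)
    (hmax : ∀ i, i < L.length → L.getD i 0 ≤ L.getD j 0)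
    (hstrict : ∀ i, i < j → L.getD i 0 < L.getD j 0) :
    (PySem.List.pyRange 1 (L.length : Int) 1).foldl (bestStep L) 0 = (j : Int) := by
  obtain ⟨j', hj', hmax', hstrict', hfold⟩ :=
    best_fold_aux L L.length (by omega) (le_refl _)
  rw [hfold]
  congr 1
  rcases lt_trichotomy j j' with h | h | h
  · have h1 := hstrict' j h
    have h2 := hmax j' hj'
    omega
  · omega
  · have h1 := hstrict j' h
    have h2 := hmax' j hj
    omega

theorem B_eq (a : List Int) (h : a ≠ []) :
    LongestDecreasingSublist_alt a = firstLongest (runs a) := by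
  obtain ⟨j, hjlen, hjval, hjmax, hjstrict, hjslice⟩ :=
    runs_best (runs a) (runs_ne_nil a h) (runs_forall_ne a)
  have hLlen : (lens (runs a)).length = a.length := by
    rw [← buildL_eq]; exact buildL_len a
  have hB : LongestDecreasingSublist_alt a
      = PySem.List.slice a
          (some ((PySem.List.pyRange 1 (a.length : Int) 1).foldl (bestStep (buildL a)) 0))
          (some ((PySem.List.pyRange 1 (a.length : Int) 1).foldl (bestStep (buildL a)) 0
            + PySem.List.pyGetD (buildL a)
                ((PySem.List.pyRange 1 (a.length : Int) 1).foldl (bestStep (buildL a)) 0) 0)) := rfl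
  rw [hB, buildL_eq]
  have hfold : (PySem.List.pyRange 1 (a.length : Int) 1).foldl (bestStep (lens (runs a))) 0
      = (j : Int) := by
    rw [← hLlen]
    exact best_fold (lens (runs a)) j hjlen hjmax hjstrict
  rw [hfold]
  simp only [PySem.List.pyGetD_natCast]
  rw [hjval, PySem.List.slice_natCast_add]
  rw [runs_flatten a] at hjslice
  exact hjslice

-- ===== VERDICT (by name: the statement is the Claim_ definition above) =====
theorem LongestDecreasingSublist_spec : Claim_equal_LongestDecreasingSublist := by
  intro a _ hpre
  unfold Spec_LongestDecreasingSublist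
  rw [A_eq a hpre, B_eq a hpre]
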